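-- pv_equiv track=rewrite | github.com/emiliatug/PFP_dataset_curator | src/Modules/pygosemsim_handler.py | breaking_propagation_sw_to_ont
-- ===== SOURCE A (Python) =====
-- from typing import List
--
-- from typing import Dict, Tuple
--
-- def breaking_propagation_sw_to_ont(
--     propagation_dic: Dict[str, List[str]]
-- ) -> Tuple[List[List[str]], List[List[str]], List[List[str]]]:
--     BP, CC, MF = [], [], []
--     for prot, terms in propagation_dic.items():
--         for go in terms:
--             if go.startswith("GO:0008"):
--                 BP.append([prot, go])
--             elif go.startswith("GO:0005"):
--                 CC.append([prot, go])
--             elif go.startswith("GO:0003"):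
--                 MF.append([prot, go])
--     return BP, CC, MF
-- ===== SOURCE B (Python) =====
-- def breaking_propagation_sw_to_ont(propagation_dic):
--     BP = [[prot, go] for prot, terms in propagation_dic.items() for go in terms if go.startswith("GO:0008")]
--     CC = [[prot, go] for prot, terms in propagation_dic.items() for go in terms if go.startswith("GO:0005")]
--     MF = [[prot, go] for prot, terms in propagation_dic.items() for go in terms if go.startswith("GO:0003")]
--     return BP, CC, MF
-- ===== Notes on version B (the rewrite author's own statement) =====
-- stated objective: simpler
-- what changed: Replaces the single branching loop with three independent list comprehensions, one full scan per category (BP/CC/MF) with its own prefix filter.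
import Mathlib
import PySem

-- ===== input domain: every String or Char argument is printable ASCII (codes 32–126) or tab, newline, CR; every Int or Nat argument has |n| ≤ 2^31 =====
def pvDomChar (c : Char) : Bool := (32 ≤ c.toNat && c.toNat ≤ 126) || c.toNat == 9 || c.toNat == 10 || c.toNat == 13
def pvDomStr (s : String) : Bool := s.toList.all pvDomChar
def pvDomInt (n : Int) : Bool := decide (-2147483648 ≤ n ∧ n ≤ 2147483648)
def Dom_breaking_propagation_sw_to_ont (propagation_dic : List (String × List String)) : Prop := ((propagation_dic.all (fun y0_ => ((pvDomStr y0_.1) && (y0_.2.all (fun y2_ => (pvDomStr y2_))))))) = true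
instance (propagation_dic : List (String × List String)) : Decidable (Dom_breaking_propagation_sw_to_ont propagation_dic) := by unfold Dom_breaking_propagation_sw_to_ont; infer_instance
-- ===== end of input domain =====

-- B replaces A's single loop with elif branches by three independent filtered scans, one per category (objective: simpler).

-- ===== PORT A =====
-- one step of A's inner loop: the elif chain on one GO term
def pvStepA (prot : String)
    (acc : List (List String) × List (List String) × List (List String)) (go : String) :
    List (List String) × List (List String) × List (List String) :=
  if PySem.Str.startswith go "GO:0008" then (acc.1 ++ [[prot, go]], acc.2.1, acc.2.2)
  else if PySem.Str.startswith go "GO:0005" then (acc.1, acc.2.1 ++ [[prot, go]], acc.2.2)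
  else if PySem.Str.startswith go "GO:0003" then (acc.1, acc.2.1, acc.2.2 ++ [[prot, go]])
  else acc

def breaking_propagation_sw_to_ont (propagation_dic : List (String × List String)) : List (List String) × List (List String) × List (List String) :=
  propagation_dic.foldl (fun acc pr => pr.2.foldl (pvStepA pr.1) acc) ([], [], [])

-- ===== PORT B =====
-- one comprehension of Source B: all [prot, go] with go starting with the given prefix, in order
def pvScanB (pre : String) (propagation_dic : List (String × List String)) : List (List String) :=
  propagation_dic.flatMap (fun pr =>
    (pr.2.filter (fun go => PySem.Str.startswith go pre)).map (fun go => [pr.1, go]))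

def breaking_propagation_sw_to_ont_alt (propagation_dic : List (String × List String)) : List (List String) × List (List String) × List (List String) :=
  (pvScanB "GO:0008" propagation_dic, pvScanB "GO:0005" propagation_dic, pvScanB "GO:0003" propagation_dic)

-- ===== PRECONDITION & SPEC =====
def Spec_breaking_propagation_sw_to_ont (propagation_dic : List (String × List String)) (out : List (List String) × List (List String) × List (List String)) : Prop := out = breaking_propagation_sw_to_ont_alt propagation_dic
instance (propagation_dic : List (String × List String)) (out : List (List String) × List (List String) × List (List String)) : Decidable (Spec_breaking_propagation_sw_to_ont propagation_dic out) := by unfold Spec_breaking_propagation_sw_to_ont; infer_instance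

-- ===== CLAIM (what is proved, stated in full; the proofs are below) =====
def Claim_equal_breaking_propagation_sw_to_ont : Prop := ∀ (propagation_dic : List (String × List String)), Dom_breaking_propagation_sw_to_ont propagation_dic → Spec_breaking_propagation_sw_to_ont propagation_dic (breaking_propagation_sw_to_ont propagation_dic)

-- ===== LEMMAS AND PROOFS =====

-- two distinct prefixes of the same length cannot both be prefixes of one string
theorem pv_startswith_excl (go : String) (p q : List Char)
    (hlen : p.length = q.length) (hne : p ≠ q)
    (hp : PySem.Chars.startswith go.toList p = true) :
    PySem.Chars.startswith go.toList q = false := by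
  by_contra h
  have hq : PySem.Chars.startswith go.toList q = true := by
    cases hc : PySem.Chars.startswith go.toList q with
    | false => exact absurd hc h
    | true => rfl
  rw [PySem.Chars.startswith_iff] at hp hq
  exact hne ((List.prefix_of_prefix_length_le hp hq (le_of_eq hlen)).eq_of_length hlen)

-- A's inner loop over one protein's terms appends exactly B's three filtered scans of those terms
theorem pv_inner (prot : String) (terms : List String)
    (acc : List (List String) × List (List String) × List (List String)) :
    terms.foldl (pvStepA prot) acc =
      (acc.1 ++ (terms.filter (fun go => PySem.Str.startswith go "GO:0008")).map (fun go => [prot, go]),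
       acc.2.1 ++ (terms.filter (fun go => PySem.Str.startswith go "GO:0005")).map (fun go => [prot, go]),
       acc.2.2 ++ (terms.filter (fun go => PySem.Str.startswith go "GO:0003")).map (fun go => [prot, go])) := by
  induction terms generalizing acc with
  | nil => simp
  | cons go rest ih =>
    simp only [List.foldl_cons, List.filter_cons, ih, pvStepA]
    by_cases h8 : PySem.Chars.startswith go.toList ['G','O',':','0','0','0','8'] = true
    · have h5 : PySem.Chars.startswith go.toList ['G','O',':','0','0','0','5'] = false :=
        pv_startswith_excl go _ _ (by decide) (by decide) h8
      have h3 : PySem.Chars.startswith go.toList ['G','O',':','0','0','0','3'] = false :=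
        pv_startswith_excl go _ _ (by decide) (by decide) h8
      simp [h8, h5, h3]
    · by_cases h5 : PySem.Chars.startswith go.toList ['G','O',':','0','0','0','5'] = true
      · have h3 : PySem.Chars.startswith go.toList ['G','O',':','0','0','0','3'] = false :=
          pv_startswith_excl go _ _ (by decide) (by decide) h5
        simp [h8, h5, h3]
      · by_cases h3 : PySem.Chars.startswith go.toList ['G','O',':','0','0','0','3'] = true
        · simp [h8, h5, h3]
        · simp [h8, h5, h3]


-- A's outer loop from any accumulator appends B's three scans of the remaining dict
theorem pv_outer (l : List (String × List String))
    (acc : List (List String) × List (List String) × List (List String)) :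
    l.foldl (fun acc pr => pr.2.foldl (pvStepA pr.1) acc) acc =
      (acc.1 ++ pvScanB "GO:0008" l, acc.2.1 ++ pvScanB "GO:0005" l, acc.2.2 ++ pvScanB "GO:0003" l) := by
  induction l generalizing acc with
  | nil => simp [pvScanB]
  | cons pr rest ih =>
    rw [List.foldl_cons, pv_inner, ih]
    simp [pvScanB]

-- ===== VERDICT (by name: the statement is the Claim_ definition above) =====
theorem breaking_propagation_sw_to_ont_spec : Claim_equal_breaking_propagation_sw_to_ont := by
  intro d _
  show breaking_propagation_sw_to_ont d = breaking_propagation_sw_to_ont_alt d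
  simp [breaking_propagation_sw_to_ont, breaking_propagation_sw_to_ont_alt, pv_outer]
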